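-- pv_equiv track=rewrite | github.com/ivanovsdesign/leetcode_150_interview_prep | Problem 224. Basic Calculator/problem224.py | find_sign
-- ===== SOURCE A (Python) =====
-- def find_sign(s: str):
--     i = 0
--
--     while i < len(s) and s[i] not in ['+', '-', '(', ')']:
--         i += 1
--
--     if i < len(s):
--         if s[i] == '+':
--             return '+', s[(i+1):]
--         elif s[i] == '-':
--             return '-', s[(i+1):]
--         elif s[i] == '(':
--             return '(', s[(i+1):]
--         elif s[i] == ')':
--             return ')', s[(i+1):]
--
--     return '+', s
-- ===== SOURCE B (Python) =====
-- def find_sign(s: str):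
--     hits = [r for r in (s.find(c) for c in '+-()') if r >= 0]
--     if not hits:
--         return '+', s
--     i = min(hits)
--     return s[i:i+1], s[(i+1):]
-- ===== Notes on version B (the rewrite author's own statement) =====
-- stated objective: idiomatic
-- what changed: Replaces the manual index-by-index early-exit scan with four str.find library scans, selection of the minimal non-negative hit, and slicing; the default ('+', s) falls out of the empty-hits case.
import Mathlib
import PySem

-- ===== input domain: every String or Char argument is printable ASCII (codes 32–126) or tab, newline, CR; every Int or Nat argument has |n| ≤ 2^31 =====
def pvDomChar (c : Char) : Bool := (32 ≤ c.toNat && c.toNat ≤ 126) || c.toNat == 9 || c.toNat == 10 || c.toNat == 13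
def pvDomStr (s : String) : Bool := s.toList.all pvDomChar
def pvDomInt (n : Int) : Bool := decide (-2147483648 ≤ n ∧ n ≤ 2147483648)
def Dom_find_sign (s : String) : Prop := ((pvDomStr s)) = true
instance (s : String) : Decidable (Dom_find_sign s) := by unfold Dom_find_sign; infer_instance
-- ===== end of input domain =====

-- B replaces A's manual index-by-index early-exit scan with four str.find scans,
-- selection of the minimal non-negative hit, and slicing (objective: idiomatic).


-- ===== PORT A =====
-- A's while loop advancing the index i until s[i] is a sign/paren character,
-- then the if/elif chain on s[i] with the slice s[(i+1):]; falls through to ('+', s).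
def findSignGo (s : String) : List Char → Nat → String × String
  | [], _ => ("+", s)
  | c :: t, i =>
    if c = '+' then ("+", PySem.Str.slice s (some ((i : Int) + 1)) none)
    else if c = '-' then ("-", PySem.Str.slice s (some ((i : Int) + 1)) none)
    else if c = '(' then ("(", PySem.Str.slice s (some ((i : Int) + 1)) none)
    else if c = ')' then (")", PySem.Str.slice s (some ((i : Int) + 1)) none)
    else findSignGo s t (i + 1)

def find_sign (s : String) : String × String := findSignGo s s.toList 0

-- ===== PORT B =====
def find_sign_alt (s : String) : String × String :=
  let hits := ([PySem.Str.find s "+", PySem.Str.find s "-",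
                PySem.Str.find s "(", PySem.Str.find s ")"]).filter (fun r => decide (0 ≤ r))
  match PySem.List.min? hits (fun r => r) with
  | none => ("+", s)
  | some i => (PySem.Str.slice s (some i) (some (i + 1)), PySem.Str.slice s (some (i + 1)) none)

-- ===== PRECONDITION & SPEC =====
def Spec_find_sign (s : String) (out : String × String) : Prop := out = find_sign_alt s
instance (s : String) (out : String × String) : Decidable (Spec_find_sign s out) := by unfold Spec_find_sign; infer_instance

-- ===== CLAIM (what is proved, stated in full; the proofs are below) =====
def Claim_equal_find_sign : Prop := ∀ (s : String), Dom_find_sign s → Spec_find_sign s (find_sign s)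

-- ===== LEMMAS AND PROOFS =====
def isSign (c : Char) : Bool := c == '+' || c == '-' || c == '(' || c == ')'

def sgnStr (c : Char) : String :=
  if c = '+' then "+" else if c = '-' then "-" else if c = '(' then "(" else ")"

lemma go_singleton (c : Char) (cs : List Char) : ∀ k : Nat,
    PySem.Chars.find.go [c] cs k = if c ∈ cs then ((k + cs.idxOf c : Nat) : Int) else -1 := by
  induction cs with
  | nil => intro k; simp [PySem.Chars.find.go]
  | cons x t ih =>
      intro k
      by_cases hx : c = x
      · subst hx
        simp [PySem.Chars.find.go, List.isPrefixOf, List.idxOf_cons_self]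
      · have hpre : ([c].isPrefixOf (x :: t)) = false := by
          simp [List.isPrefixOf, hx]
        simp only [PySem.Chars.find.go, hpre]
        rw [ih (k + 1)]
        by_cases hm : c ∈ t
        · simp [List.mem_cons, hx, hm, Ne.symm hx]
          omega
        · simp [List.mem_cons, hx, hm]

lemma find_singleton (cs : List Char) (c : Char) :
    PySem.Chars.find cs [c] = if c ∈ cs then (cs.idxOf c : Int) else -1 := by
  simpa using go_singleton c cs 0

lemma idxOf_le_of_getElem (cs : List Char) (c : Char) (i : Nat) (hi : i < cs.length)
    (h : cs[i] = c) : cs.idxOf c ≤ i := by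
  by_contra hle
  have hlt : i < cs.idxOf c := by omega
  have hne := List.not_of_lt_findIdx (p := (· == c)) (xs := cs) (i := i) hlt
  simp at hne
  exact hne h

lemma findIdx_le_of_getElem (p : Char → Bool) (cs : List Char) (i : Nat) (hi : i < cs.length)
    (h : p cs[i] = true) : cs.findIdx p ≤ i := by
  by_contra hle
  have hlt : i < cs.findIdx p := by omega
  have hne := List.not_of_lt_findIdx (p := p) (xs := cs) (i := i) hlt
  exact Bool.false_ne_true (hne.symm.trans h)

lemma idxOf_getElem_findIdx (cs : List Char) (hj : cs.findIdx isSign < cs.length) :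
    cs.idxOf (cs[cs.findIdx isSign]'hj) = cs.findIdx isSign := by
  have h1 : cs.idxOf (cs[cs.findIdx isSign]'hj) ≤ cs.findIdx isSign :=
    idxOf_le_of_getElem cs _ _ hj rfl
  refine le_antisymm h1 ?_
  have hlt : cs.idxOf (cs[cs.findIdx isSign]'hj) < cs.length := lt_of_le_of_lt h1 hj
  exact findIdx_le_of_getElem isSign cs _ hlt
    (by rw [List.getElem_idxOf hlt]; exact List.findIdx_getElem)

lemma sign_bound (cs : List Char) (c : Char) (hsc : isSign c = true)
    (h0 : (0 : Int) ≤ (if c ∈ cs then (cs.idxOf c : Int) else -1)) :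
    ((cs.findIdx isSign : Nat) : Int) ≤ (if c ∈ cs then (cs.idxOf c : Int) else -1) := by
  by_cases hm : c ∈ cs
  · simp only [hm, if_true]
    have hlt : cs.idxOf c < cs.length :=
      lt_of_le_of_lt (le_refl _) (by
        exact List.findIdx_lt_length.mpr ⟨c, hm, by simp⟩)
    have hle := findIdx_le_of_getElem isSign cs (cs.idxOf c) hlt
      (by rw [List.getElem_idxOf hlt]; exact hsc)
    exact_mod_cast hle
  · simp [hm] at h0

lemma loopA_none (s : String) (cs : List Char) (i : Nat)
    (h : ∀ c ∈ cs, isSign c = false) : findSignGo s cs i = ("+", s) := by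
  induction cs generalizing i with
  | nil => rfl
  | cons x t ih =>
      have hx := h x (by simp)
      simp [isSign] at hx
      simp [findSignGo, hx.1.1.1, hx.1.1.2, hx.1.2, hx.2]
      exact ih (i + 1) (fun c hc => h c (List.mem_cons_of_mem x hc))

lemma loopA_some (s : String) (cs : List Char) (i : Nat)
    (hj : cs.findIdx isSign < cs.length) :
    findSignGo s cs i =
      (sgnStr (cs[cs.findIdx isSign]'hj),
       PySem.Str.slice s (some (((i + cs.findIdx isSign : Nat) : Int) + 1)) none) := by
  induction cs generalizing i with
  | nil => simp at hj
  | cons x t ih =>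
      by_cases hx : isSign x = true
      · have h0 : (x :: t).findIdx isSign = 0 := by
          simp [List.findIdx_cons, hx]
        simp only [h0]
        simp only [isSign] at hx
        simp only [Bool.or_eq_true, beq_iff_eq] at hx
        rcases hx with ((h | h) | h) | h <;> subst h <;>
          simp [findSignGo, sgnStr]
      · have hxf : isSign x = false := by simpa using hx
        have h1 : (x :: t).findIdx isSign = t.findIdx isSign + 1 := by
          simp [List.findIdx_cons, hxf]
        have hx4 := hxf
        simp [isSign] at hx4
        have hjt : t.findIdx isSign < t.length := by
          simp [h1] at hj ⊢; omega
        simp only [findSignGo, hx4.1.1.1, hx4.1.1.2, hx4.1.2, hx4.2, if_false]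
        rw [ih (i + 1) hjt, Prod.mk.injEq]
        refine ⟨?_, ?_⟩
        · simp [h1]
        · have h2 : i + 1 + t.findIdx isSign = i + (x :: t).findIdx isSign := by
            rw [h1]; omega
          rw [h2]

lemma no_sign_of_not_findIdx (cs : List Char) (h : ¬ cs.findIdx isSign < cs.length) :
    ∀ c ∈ cs, isSign c = false := by
  intro c hc
  by_contra hcs
  exact h (List.findIdx_lt_length.mpr ⟨c, hc, by simpa using hcs⟩)

-- ===== VERDICT (by name: the statement is the Claim_ definition above) =====
theorem find_sign_spec : Claim_equal_find_sign := by
  intro s _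
  unfold Spec_find_sign find_sign find_sign_alt
  set cs := s.toList with hcs
  have F : ∀ (c : Char) (cstr : String), cstr.toList = [c] →
      PySem.Str.find s cstr = if c ∈ cs then (cs.idxOf c : Int) else -1 := by
    intro c cstr hct
    rw [PySem.Str.find_eq, hct, find_singleton]
  have f1 := F '+' "+" rfl
  have f2 := F '-' "-" rfl
  have f3 := F '(' "(" rfl
  have f4 := F ')' ")" rfl
  by_cases hj : cs.findIdx isSign < cs.length
  · -- a sign/paren character occurs; both return it at the first sign index j
    set j := cs.findIdx isSign with hjdef
    have hd : isSign (cs[j]'hj) = true := List.findIdx_getElem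
    have hjval : (if (cs[j]'hj) ∈ cs then (cs.idxOf (cs[j]'hj) : Int) else -1) = ((j : Nat) : Int) := by
      rw [if_pos (List.getElem_mem hj), idxOf_getElem_findIdx cs hj]
    have hjmem : ((j : Nat) : Int) ∈ (([PySem.Str.find s "+", PySem.Str.find s "-",
        PySem.Str.find s "(", PySem.Str.find s ")"]).filter (fun r => decide (0 ≤ r))) := by
      refine List.mem_filter.mpr ⟨?_, by simp⟩
      rw [f1, f2, f3, f4]
      have hd4 := hd
      simp only [isSign, Bool.or_eq_true, beq_iff_eq] at hd4
      rcases hd4 with ((h | h) | h) | h <;> rw [← hjval, h] <;> simp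
    have hmin : PySem.List.min? (([PySem.Str.find s "+", PySem.Str.find s "-",
        PySem.Str.find s "(", PySem.Str.find s ")"]).filter (fun r => decide (0 ≤ r)))
        (fun r => r) = some ((j : Nat) : Int) := by
      cases hm : PySem.List.min? (([PySem.Str.find s "+", PySem.Str.find s "-",
          PySem.Str.find s "(", PySem.Str.find s ")"]).filter (fun r => decide (0 ≤ r)))
          (fun r => r) with
      | none =>
          rw [PySem.List.min?_eq_none_iff] at hm
          rw [hm] at hjmem
          simp at hjmem
      | some m =>
          have hmle : m ≤ ((j : Nat) : Int) := PySem.List.min?_isMin hm _ hjmem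
          have hmem := PySem.List.min?_mem hm
          have hmem' := List.mem_filter.mp hmem
          have hm0 : (0 : Int) ≤ m := by simpa using hmem'.2
          have hjm : ((j : Nat) : Int) ≤ m := by
            have hl := hmem'.1
            rw [f1, f2, f3, f4] at hl
            simp only [List.mem_cons, List.not_mem_nil, or_false] at hl
            rcases hl with h | h | h | h <;> rw [h] <;> rw [h] at hm0 <;>
              [exact sign_bound cs '+' rfl hm0; exact sign_bound cs '-' rfl hm0;
               exact sign_bound cs '(' rfl hm0; exact sign_bound cs ')' rfl hm0]
          exact congrArg some (le_antisymm hmle hjm)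
    rw [loopA_some s cs 0 hj]
    simp only [hmin]
    rw [Prod.mk.injEq]
    constructor
    · -- sgnStr cs[j] = s[j:j+1]
      rw [← String.toList_inj, PySem.Str.toList_slice]
      show _ = PySem.List.slice cs (some ((j : Nat) : Int)) (some (((j : Nat) : Int) + 1))
      have hcast : ((j : Nat) : Int) + 1 = ((j + 1 : Nat) : Int) := by push_cast; ring
      rw [hcast, PySem.List.slice_natCast, List.drop_eq_getElem_cons hj]
      have ht1 : j + 1 - j = 1 := by omega
      rw [ht1]
      have hd4 := hd
      simp only [isSign, Bool.or_eq_true, beq_iff_eq] at hd4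
      rcases hd4 with ((h | h) | h) | h <;> rw [h] <;> simp [sgnStr]
    · -- the rest slice s[j+1:]
      have h2 : ((0 + List.findIdx isSign cs : Nat) : Int) + 1 = ((List.findIdx isSign cs : Nat) : Int) + 1 := by
        push_cast; ring
      rw [h2]
  · -- no sign character: both return ("+", s)
    have hall := no_sign_of_not_findIdx cs hj
    have h4 : ∀ c : Char, isSign c = true → c ∉ cs := fun c hc hm => by
      have := hall c hm; rw [this] at hc; cases hc
    rw [loopA_none s cs 0 hall, f1, f2, f3, f4,
      if_neg (h4 '+' rfl), if_neg (h4 '-' rfl), if_neg (h4 '(' rfl), if_neg (h4 ')' rfl)]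
    simp [PySem.List.min?]
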